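-- pv_equiv track=rewrite | github.com/amnnaqvi/DSA-Project-CS-102- | SearchADT.py | rank_bwt
-- ===== SOURCE A (Python) =====
-- def rank_bwt(bw):   # Time Complexity is O(n**2)
--     totals = {}
--     occ_ranks = []
--     for char in bw:
--         if char not in totals:
--             totals[char] = 0
--         totals[char] += 1
--         # Create a new snapshot dictionary for this rank
--         snapshot = {char: count for char, count in totals.items()}
--         occ_ranks.append(snapshot)
--     return occ_ranks
-- ===== SOURCE B (Python) =====
-- def rank_bwt(bw):
--     # Two-pass decomposition: collect the distinct characters in first-occurrence
--     # order, build a cumulative-count series per character, then transpose those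
--     # series into the per-position snapshots.  A character appears in snapshot i
--     # exactly when it occurs in bw[:i+1] (its cumulative count there is positive).
--     chars = list(bw)
--     order = list(dict.fromkeys(chars))
--     pref = {}
--     for c in order:
--         run = 0
--         acc = []
--         for ch in chars:
--             if ch == c:
--                 run += 1
--             acc.append(run)
--         pref[c] = acc
--     return [{c: pref[c][i] for c in order if pref[c][i] > 0} for i in range(len(chars))]
-- ===== Notes on version B (the rewrite author's own statement) =====
-- stated objective: alternative
-- what changed: Instead of A's single loop that mutates a running totals dict and appends a copy of it at every character, B makes two independent passes: it collects the distinct characters in first-occurrence order, builds one cumulative-count series per character, and then transposes the series into per-position snapshots, including a character exactly when its count in the prefix is positive.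
import Mathlib
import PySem

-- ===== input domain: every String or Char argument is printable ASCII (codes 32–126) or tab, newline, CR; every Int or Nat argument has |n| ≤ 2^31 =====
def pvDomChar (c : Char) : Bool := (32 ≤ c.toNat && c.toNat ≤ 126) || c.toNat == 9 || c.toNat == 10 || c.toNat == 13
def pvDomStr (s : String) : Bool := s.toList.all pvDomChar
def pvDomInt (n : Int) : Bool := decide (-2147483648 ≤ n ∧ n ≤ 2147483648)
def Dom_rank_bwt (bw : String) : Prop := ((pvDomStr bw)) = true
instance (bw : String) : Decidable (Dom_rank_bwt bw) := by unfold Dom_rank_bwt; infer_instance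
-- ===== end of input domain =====

-- B rebuilds each snapshot from distinct characters and prefix counts (two independent
-- passes) instead of A's running dict that is copied at every step; objective: alternative.

-- ===== PORT A =====
-- running totals dict + copy of it appended at every character
def rank_bwt (bw : String) : List (List (String × Int)) :=
  ((bw.toList).foldl
    (fun (st : PySem.Dict String Int × List (List (String × Int))) ch =>
      let s := String.ofList [ch]
      let t0 := if st.1.contains s then st.1 else st.1.insert s 0   -- if char not in totals: totals[char] = 0
      let t := t0.insert s (t0.getD s 0 + 1)                        -- totals[char] += 1
      (t, st.2 ++ [t.items]))                                       -- snapshot = copy of totals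
    (PySem.Dict.empty, [])).2

-- ===== PORT B =====
-- distinct characters in first-occurrence order, one cumulative-count series per
-- character, then the series are transposed into snapshots; 'order' has no
-- duplicates, so each dict comprehension IS its association list.
def rank_bwt_alt (bw : String) : List (List (String × Int)) :=
  let chars := bw.toList
  let order := PySem.List.dedup chars                         -- list(dict.fromkeys(chars))
  let pref : PySem.Dict Char (List Int) :=
    order.foldl (fun d c =>
      d.insert c
        ((chars.foldl (fun (st : Int × List Int) ch =>
          let run := if ch == c then st.1 + 1 else st.1
          (run, st.2 ++ [run])) ((0 : Int), [])).2)) PySem.Dict.empty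
  (PySem.List.pyRange 0 chars.length 1).map (fun i =>
    (order.filter (fun c => decide ((0:Int) < PySem.List.pyGetD (pref.getD c []) i 0))).map
      (fun c => (String.ofList [c], PySem.List.pyGetD (pref.getD c []) i 0)))

-- ===== PRECONDITION & SPEC =====
def Spec_rank_bwt (bw : String) (out : List (List (String × Int))) : Prop := out = rank_bwt_alt bw
instance (bw : String) (out : List (List (String × Int))) : Decidable (Spec_rank_bwt bw out) := by unfold Spec_rank_bwt; infer_instance

-- ===== CLAIM (what is proved, stated in full; the proofs are below) =====
def Claim_equal_rank_bwt : Prop := ∀ (bw : String), Dom_rank_bwt bw → Spec_rank_bwt bw (rank_bwt bw)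

-- ===== LEMMAS AND PROOFS =====

-- A's loop body on the totals dict alone
def stepA (d : PySem.Dict String Int) (ch : Char) : PySem.Dict String Int :=
  let s := String.ofList [ch]
  let t0 := if d.contains s then d else d.insert s 0
  t0.insert s (t0.getD s 0 + 1)

-- A's full loop body (totals, snapshots)
def stepA2 (st : PySem.Dict String Int × List (List (String × Int))) (ch : Char) :
    PySem.Dict String Int × List (List (String × Int)) :=
  (stepA st.1 ch, st.2 ++ [(stepA st.1 ch).items])

theorem rank_bwt_eq_foldl (bw : String) :
    rank_bwt bw = ((bw.toList).foldl stepA2 (PySem.Dict.empty, [])).2 := rfl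

-- closed form of A's totals after processing p
def totalsOf (p : List Char) : PySem.Dict String Int :=
  PySem.Dict.mk ((PySem.List.dedup p).map (fun c => (String.ofList [c], (p.count c : Int))))

theorem ofList_single_inj {c d : Char} (h : String.ofList [c] = String.ofList [d]) : c = d := by
  have := congrArg String.toList h; simpa using this

theorem totalsOf_keys (p : List Char) :
    (totalsOf p).keys = (PySem.List.dedup p).map (fun c => String.ofList [c]) := by
  simp [totalsOf, PySem.Dict.keys]

theorem totalsOf_keys_nodup (p : List Char) : (totalsOf p).keys.Nodup := by
  rw [totalsOf_keys]
  exact (PySem.List.nodup_dedup p).map (fun _ _ h => ofList_single_inj h)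

theorem totalsOf_contains (p : List Char) (c : Char) :
    (totalsOf p).contains (String.ofList [c]) = p.contains c := by
  rw [PySem.Dict.contains_eq_decide_mem_keys, totalsOf_keys]
  simp only [List.mem_map]
  by_cases h : c ∈ p
  · simp [h]
    exact ⟨c, by simpa [PySem.List.mem_dedup] using h, rfl⟩
  · simp [h]
    intro x hx hxc
    exact h (by simpa [PySem.List.mem_dedup, ofList_single_inj hxc] using hx)

theorem totalsOf_getD (p : List Char) (c : Char) (h : c ∈ p) :
    (totalsOf p).getD (String.ofList [c]) 0 = (p.count c : Int) := by
  refine PySem.Dict.getD_of_mem_items _ ?_ (totalsOf_keys_nodup p) 0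
  simp only [totalsOf]
  exact List.mem_map.mpr ⟨c, by simpa [PySem.List.mem_dedup] using h, rfl⟩

theorem stepA_totalsOf (p : List Char) (ch : Char) :
    stepA (totalsOf p) ch = totalsOf (p ++ [ch]) := by
  by_cases h : ch ∈ p
  · -- already-seen character: overwrite in place
    apply PySem.Dict.ext
    have hc : (totalsOf p).contains (String.ofList [ch]) = true := by
      rw [totalsOf_contains]; simpa [List.contains_iff_mem] using h
    simp only [stepA, hc, if_pos]
    rw [PySem.Dict.items_insert_of_contains _ _ hc, totalsOf_getD p ch h]
    have hd : PySem.List.dedup (p ++ [ch]) = PySem.List.dedup p := by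
      simp only [PySem.List.dedup_eq_ofList, PySem.Set.ofList_append_singleton]
      simp [PySem.Set.add, PySem.Set.mem_ofList, h]
    simp only [totalsOf, hd, List.map_map]
    apply List.map_congr_left
    intro x hx
    by_cases hxc : x = ch
    · subst hxc; simp [List.count_append]
    · have hne : String.ofList [x] ≠ String.ofList [ch] := fun hh => hxc (ofList_single_inj hh)
      simp [hne, List.count_append, Ne.symm hxc]
  · -- fresh character: append (key 0 then overwrite to 1)
    apply PySem.Dict.ext
    have hc : (totalsOf p).contains (String.ofList [ch]) = false := by
      rw [totalsOf_contains]; simpa [List.contains_iff_mem] using h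
    simp only [stepA, hc, if_neg, Bool.false_eq_true, not_false_iff]
    rw [PySem.Dict.items_insert_of_contains _ _ (by simp [PySem.Dict.contains_insert_self]),
        PySem.Dict.getD_insert_self,
        PySem.Dict.items_insert_of_not_contains _ _ hc]
    have hd : PySem.List.dedup (p ++ [ch]) = PySem.List.dedup p ++ [ch] := by
      simp only [PySem.List.dedup_eq_ofList, PySem.Set.ofList_append_singleton]
      simp [PySem.Set.add, PySem.Set.mem_ofList, h]
    simp only [totalsOf, hd, List.map_append, List.map_map]
    congr 1
    · apply List.map_congr_left
      intro x hx
      have hxp : x ∈ p := by simpa [PySem.List.mem_dedup] using hx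
      have hxc : x ≠ ch := fun he => h (he ▸ hxp)
      have hne : String.ofList [x] ≠ String.ofList [ch] := fun hh => hxc (ofList_single_inj hh)
      simp [hne, List.count_append, Ne.symm hxc]
    · have : p.count ch = 0 := List.count_eq_zero.mpr h
      simp [List.count_append, this]

theorem totalsOf_nil : totalsOf [] = PySem.Dict.empty := rfl

-- A's fold produces the snapshots of all prefixes
theorem foldl_stepA2 (l p : List Char) (acc : List (List (String × Int))) :
    (l.foldl stepA2 (totalsOf p, acc)).2 =
      acc ++ (List.range l.length).map (fun i => (totalsOf (p ++ l.take (i + 1))).items) := by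
  induction l generalizing p acc with
  | nil => simp
  | cons c l ih =>
    have h1 : stepA2 (totalsOf p, acc) c = (totalsOf (p ++ [c]), acc ++ [(totalsOf (p ++ [c])).items]) := by
      simp [stepA2, stepA_totalsOf]
    rw [List.foldl_cons, h1, ih]
    rw [List.length_cons, List.range_succ_eq_map]
    simp only [List.map_cons, List.map_map]
    simp [List.append_assoc, Function.comp_def]

-- a prefix's deduped characters are the whole string's deduped characters that occur in the prefix
theorem dedup_filter_prefix (p q : List Char) :
    (PySem.List.dedup (p ++ q)).filter (fun c => p.contains c) = PySem.List.dedup p := by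
  simp only [PySem.List.dedup_eq_ofList, PySem.Set.ofList_append,
    PySem.Set.update_eq_append_filter, List.filter_append]
  have h1 : (PySem.Set.ofList p).filter (fun c => p.contains c) = PySem.Set.ofList p := by
    apply List.filter_eq_self.mpr
    intro a ha
    simpa [List.contains_iff_mem] using (PySem.Set.mem_ofList _ _).mp ha
  have h2 : ((PySem.Set.ofList q).filter
      (fun y => !(PySem.Set.contains (PySem.Set.ofList p) y))).filter (fun c => p.contains c) = [] := by
    rw [List.filter_filter]
    apply List.filter_eq_nil_iff.mpr
    intro a ha
    by_cases hap : a ∈ p <;> simp [hap]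
  rw [h1, h2, List.append_nil]

-- B's inner accumulation loop yields the cumulative counts of c over all prefixes
theorem accFold_eq (c : Char) (l : List Char) (r : Int) (acc0 : List Int) :
    (l.foldl (fun (st : Int × List Int) ch =>
        (if ch == c then st.1 + 1 else st.1, st.2 ++ [if ch == c then st.1 + 1 else st.1]))
      (r, acc0)).2 =
      acc0 ++ (List.range l.length).map (fun j => r + ((l.take (j+1)).count c : Int)) := by
  induction l generalizing r acc0 with
  | nil => simp
  | cons c0 l ih =>
    rw [List.foldl_cons]
    simp only []
    rw [ih, List.length_cons, List.range_succ_eq_map]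
    simp only [List.map_cons, List.map_map, List.append_assoc, List.singleton_append,
      Function.comp_def]
    congr 1
    congr 1
    · by_cases hc : c0 = c <;> simp [hc]
    · apply List.map_congr_left
      intro j hj
      simp only [List.take_succ_cons, List.count_cons]
      by_cases hc : c0 = c
      · simp [hc]; ring
      · simp [hc]

-- the per-character series B stores under key c
def prefCounts (chars : List Char) (c : Char) : List Int :=
  (List.range chars.length).map (fun j => ((chars.take (j+1)).count c : Int))

theorem accFold_eq' (c : Char) (l : List Char) :
    (l.foldl (fun (st : Int × List Int) ch =>
        (if ch == c then st.1 + 1 else st.1, st.2 ++ [if ch == c then st.1 + 1 else st.1]))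
      ((0 : Int), [])).2 = prefCounts l c := by
  rw [accFold_eq]
  simp [prefCounts]

-- B's pref dict maps every character of order to its series
theorem pref_getD (chars : List Char) (c : Char) (hc : c ∈ PySem.List.dedup chars) :
    (((PySem.List.dedup chars).foldl (fun d c =>
      d.insert c
        ((chars.foldl (fun (st : Int × List Int) ch =>
          (if ch == c then st.1 + 1 else st.1, st.2 ++ [if ch == c then st.1 + 1 else st.1]))
        ((0 : Int), [])).2)) PySem.Dict.empty).getD c []) = prefCounts chars c := by
  have hfresh : ∀ a ∈ PySem.List.dedup chars,
      (PySem.Dict.empty : PySem.Dict Char (List Int)).contains ((fun c => c) a) = false := by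
    intro a _; exact PySem.Dict.contains_empty a
  have hnd : (List.map (fun c => c) (PySem.List.dedup chars)).Nodup := by
    simp
  have hitems := PySem.Dict.items_foldl_insert_fresh (PySem.List.dedup chars) (fun c => c)
    (fun c => ((chars.foldl (fun (st : Int × List Int) ch =>
        (if ch == c then st.1 + 1 else st.1, st.2 ++ [if ch == c then st.1 + 1 else st.1]))
      ((0 : Int), [])).2)) PySem.Dict.empty hfresh hnd
  set D := ((PySem.List.dedup chars).foldl (fun d c =>
      d.insert c
        ((chars.foldl (fun (st : Int × List Int) ch =>
          (if ch == c then st.1 + 1 else st.1, st.2 ++ [if ch == c then st.1 + 1 else st.1]))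
        ((0 : Int), [])).2)) PySem.Dict.empty) with hD
  have hmem : (c, prefCounts chars c) ∈ D.items := by
    rw [hD, hitems]
    refine List.mem_map.mpr ⟨c, hc, ?_⟩
    simp only [accFold_eq']
  have hkeys : D.keys.Nodup := by
    have hk : D.keys = D.items.map (·.1) := rfl
    rw [hk, hD, hitems]
    have he : (PySem.Dict.empty : PySem.Dict Char (List Int)).items = [] := rfl
    rw [he]
    rw [List.nil_append, List.map_map]
    simp [Function.comp_def]
  exact PySem.Dict.getD_of_mem_items D hmem hkeys []

-- ===== VERDICT (by name: the statement is the Claim_ definition above) =====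
theorem rank_bwt_spec : Claim_equal_rank_bwt := by
  intro bw _
  show rank_bwt bw = rank_bwt_alt bw
  rw [rank_bwt_eq_foldl, ← totalsOf_nil, foldl_stepA2]
  simp only [List.nil_append, rank_bwt_alt]
  rw [PySem.List.pyRange_one]
  simp only [Int.sub_zero, Int.toNat_natCast, List.map_map, Function.comp_def]
  apply List.map_congr_left
  intro i hi
  have hi' : i < bw.toList.length := List.mem_range.mp hi
  have hval : ∀ c, c ∈ PySem.List.dedup bw.toList →
      PySem.List.pyGetD ((((PySem.List.dedup bw.toList).foldl (fun d c =>
        d.insert c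
          ((bw.toList.foldl (fun (st : Int × List Int) ch =>
            (if ch == c then st.1 + 1 else st.1, st.2 ++ [if ch == c then st.1 + 1 else st.1]))
          ((0 : Int), [])).2)) PySem.Dict.empty).getD c []))
        ((0 : Int) + (i : Int)) 0 = ((bw.toList.take (i+1)).count c : Int) := by
    intro c hc
    rw [pref_getD bw.toList c hc]
    have h0 : ((0 : Int) + (i : Int)) = ((i : Nat) : Int) := by ring
    rw [h0, PySem.List.pyGetD_natCast]
    simp only [prefCounts, List.getD_eq_getElem?_getD, List.getElem?_map,
      List.getElem?_range hi', Option.map_some, Option.getD_some]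
  have hfilter : (PySem.List.dedup bw.toList).filter
      (fun c => (bw.toList.take (i+1)).contains c) = PySem.List.dedup (bw.toList.take (i+1)) := by
    have hf := dedup_filter_prefix (bw.toList.take (i+1)) (bw.toList.drop (i+1))
    rwa [List.take_append_drop] at hf
  have hfc : (PySem.List.dedup bw.toList).filter
        (fun c => decide ((0:Int) < PySem.List.pyGetD ((((PySem.List.dedup bw.toList).foldl (fun d c =>
          d.insert c
            ((bw.toList.foldl (fun (st : Int × List Int) ch =>
              (if ch == c then st.1 + 1 else st.1, st.2 ++ [if ch == c then st.1 + 1 else st.1]))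
            ((0 : Int), [])).2)) PySem.Dict.empty).getD c [])) ((0 : Int) + (i : Int)) 0)) =
      PySem.List.dedup (bw.toList.take (i+1)) := by
    rw [← hfilter]
    apply List.filter_congr
    intro c hc
    rw [hval c hc]
    by_cases hm : c ∈ bw.toList.take (i+1)
    · simp [List.count_pos_iff.mpr hm, hm]
    · simp [List.count_eq_zero.mpr hm, hm]
  rw [hfc]
  apply Eq.symm
  apply (List.map_congr_left ?_).trans ?_
  · exact fun c => (String.ofList [c], ((bw.toList.take (i+1)).count c : Int))
  · intro c hc
    have hcd : c ∈ PySem.List.dedup bw.toList := by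
      have : c ∈ bw.toList := List.mem_of_mem_take ((PySem.List.mem_dedup _ _).mp hc)
      exact (PySem.List.mem_dedup _ _).mpr this
    rw [hval c hcd]
  · rfl
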